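-- pv_equiv track=rewrite | github.com/Yuk1star/AI-security | lab/lab2/第二次作业_nlp部分/attacks_nlp/attacks/match.py | update_cand
-- ===== SOURCE A (Python) =====
-- def update_cand(indices, k, cand_row, cand_col, cands_list):
--     """
--
--     Parameters
--     ----------
--     indices : List[int]
--         下标列表
--     k : int
--         为第几个下标生成候选
--     cand_row : List[Set]
--         各行对应的候选集合
--     cand_col : List[Set]
--         列对应的候选集合
--     cands_list : List[List]
--         第几位对应的候选集合
--
--     Returns
--     -------
--
--     """
--     if k == 0:
--         return cands_list[0]
--     idx = indices[0]
--     r, c = cands_list[0][idx]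
--     cands = cand_row[r].intersection(cand_col[c])
--     for i in range(1, k):
--         idx = indices[i]
--         r, c = cands_list[i][idx]
--         cands.intersection_update(cand_row[r])
--         cands.intersection_update(cand_col[c])
--     return sorted(cands)
-- ===== SOURCE B (Python) =====
-- def update_cand(indices, k, cand_row, cand_col, cands_list):
--     if k == 0:
--         return cands_list[0]
--     # Counting algorithm: no set intersections at all. Tally, in one dict, how many
--     # of the 2k relevant sets each element belongs to; an element lies in the
--     # intersection exactly when its tally is 2k (each set holds distinct elements).
--     counts = {}
--     for i in range(k):
--         r, c = cands_list[i][indices[i]]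
--         for x in cand_row[r]:
--             counts[x] = counts.get(x, 0) + 1
--         for x in cand_col[c]:
--             counts[x] = counts.get(x, 0) + 1
--     return sorted(x for x, n in counts.items() if n == 2 * k)
-- ===== Notes on version B (the rewrite author's own statement) =====
-- stated objective: alternative
-- what changed: Replaces set intersections entirely with a counting algorithm: one dict tallies for each element how many of the 2k relevant sets contain it, and the result is the sorted elements whose tally equals 2k; Pre_ restricts to the natural domain k >= 0 (on negative k, outside it, A still returns a value while B returns []).
-- outside the precondition, e.g. on update_cand([0], -1, [{(1, 1)}], [{(1, 1)}], [[(0, 0)]]): A returns [(1, 1)], B returns []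
import Mathlib
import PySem

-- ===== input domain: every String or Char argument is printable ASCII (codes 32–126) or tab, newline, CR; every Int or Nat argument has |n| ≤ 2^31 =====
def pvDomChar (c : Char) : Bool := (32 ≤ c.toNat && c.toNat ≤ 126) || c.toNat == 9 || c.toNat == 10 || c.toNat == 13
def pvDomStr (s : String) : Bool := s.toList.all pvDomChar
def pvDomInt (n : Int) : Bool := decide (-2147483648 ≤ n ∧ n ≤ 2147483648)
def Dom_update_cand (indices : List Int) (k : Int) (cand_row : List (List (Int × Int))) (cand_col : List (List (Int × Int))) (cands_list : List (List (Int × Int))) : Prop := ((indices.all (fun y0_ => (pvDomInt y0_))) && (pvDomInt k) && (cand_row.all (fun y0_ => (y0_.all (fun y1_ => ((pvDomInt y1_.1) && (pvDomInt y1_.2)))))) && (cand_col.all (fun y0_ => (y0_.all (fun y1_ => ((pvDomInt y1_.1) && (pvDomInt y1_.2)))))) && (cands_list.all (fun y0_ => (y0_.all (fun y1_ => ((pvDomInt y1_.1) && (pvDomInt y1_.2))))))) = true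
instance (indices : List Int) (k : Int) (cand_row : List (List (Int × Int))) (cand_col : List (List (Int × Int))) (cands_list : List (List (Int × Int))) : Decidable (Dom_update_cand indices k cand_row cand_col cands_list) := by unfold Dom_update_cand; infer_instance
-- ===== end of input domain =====

-- B replaces A's set intersections with a counting algorithm (a dict tallying, per element,
-- in how many of the 2k relevant sets it occurs; the intersection is the elements with tally 2k);
-- objective: alternative. Equivalence is about the RETURN value; neither program mutates its
-- arguments observably (A's intersection_update acts on a fresh set A itself created).

-- ===== PORT A =====
def update_cand (indices : List Int) (k : Int) (cand_row : List (List (Int × Int))) (cand_col : List (List (Int × Int))) (cands_list : List (List (Int × Int))) : List (Int × Int) :=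
  if k = 0 then PySem.List.pyGetD cands_list 0 []
  else
    let idx := PySem.List.pyGetD indices 0 0
    let rc := PySem.List.pyGetD (PySem.List.pyGetD cands_list 0 []) idx (0, 0)
    let cands : PySem.Set (Int × Int) :=
      PySem.Set.inter (PySem.Set.ofList (PySem.List.pyGetD cand_row rc.1 []))
        (PySem.Set.ofList (PySem.List.pyGetD cand_col rc.2 []))
    let cands := (PySem.List.pyRange 1 k 1).foldl (fun s i =>
      let idx := PySem.List.pyGetD indices i 0
      let rc := PySem.List.pyGetD (PySem.List.pyGetD cands_list i []) idx (0, 0)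
      PySem.Set.inter (PySem.Set.inter s (PySem.Set.ofList (PySem.List.pyGetD cand_row rc.1 [])))
        (PySem.Set.ofList (PySem.List.pyGetD cand_col rc.2 []))) cands
    PySem.List.sorted2 cands Prod.fst Prod.snd false

-- ===== PORT B =====
-- 'counts[x] = counts.get(x, 0) + 1' is Dict.modify x 0 (· + 1); the sets cand_row[r] /
-- cand_col[c] are iterated only to build the tally dict, whose sorted filtered keys do not
-- depend on that iteration order.
def update_cand_alt (indices : List Int) (k : Int) (cand_row : List (List (Int × Int))) (cand_col : List (List (Int × Int))) (cands_list : List (List (Int × Int))) : List (Int × Int) :=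
  if k = 0 then PySem.List.pyGetD cands_list 0 []
  else
    let counts : PySem.Dict (Int × Int) Int :=
      (PySem.List.pyRange 0 k 1).foldl (fun d i =>
        let rc := PySem.List.pyGetD (PySem.List.pyGetD cands_list i [])
          (PySem.List.pyGetD indices i 0) (0, 0)
        let d := (PySem.Set.ofList (PySem.List.pyGetD cand_row rc.1 [])).foldl
          (fun d x => d.modify x 0 (· + 1)) d
        (PySem.Set.ofList (PySem.List.pyGetD cand_col rc.2 [])).foldl
          (fun d x => d.modify x 0 (· + 1)) d) PySem.Dict.empty
    PySem.List.sorted2 ((counts.items.filter (fun p => p.2 == 2 * k)).map Prod.fst)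
      Prod.fst Prod.snd false

-- ===== PRECONDITION & SPEC =====
-- Pre_ restricts to the natural domain k ≥ 0 (on k < 0, outside it, A still returns a value but
-- B returns []), and otherwise excludes exactly the inputs where A raises an IndexError:
-- k = 0 with empty cands_list, or some lookup of step i out of range.
def pvStepOk (indices : List Int) (cand_row : List (List (Int × Int))) (cand_col : List (List (Int × Int))) (cands_list : List (List (Int × Int))) (i : Nat) : Bool :=
  match PySem.List.pyGet? indices (i : Int), PySem.List.pyGet? cands_list (i : Int) with
  | some idx, some cl =>
    match PySem.List.pyGet? cl idx with
    | some rc =>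
      decide (-(cand_row.length : Int) ≤ rc.1 ∧ rc.1 < cand_row.length) &&
      decide (-(cand_col.length : Int) ≤ rc.2 ∧ rc.2 < cand_col.length)
    | none => false
  | _, _ => false

def Pre_update_cand (indices : List Int) (k : Int) (cand_row : List (List (Int × Int))) (cand_col : List (List (Int × Int))) (cands_list : List (List (Int × Int))) : Prop :=
  0 ≤ k ∧ (k = 0 → cands_list ≠ []) ∧ k ≤ (indices.length : Int) ∧
  ∀ i : Nat, i < k.toNat → pvStepOk indices cand_row cand_col cands_list i = true
instance (indices : List Int) (k : Int) (cand_row : List (List (Int × Int))) (cand_col : List (List (Int × Int))) (cands_list : List (List (Int × Int))) : Decidable (Pre_update_cand indices k cand_row cand_col cands_list) := by unfold Pre_update_cand; infer_instance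

def pvWitness_update_cand : List Int × Int × (List (List (Int × Int))) × (List (List (Int × Int))) × (List (List (Int × Int))) :=
  ([0], 1, [[(1, 1), (2, 2)]], [[(1, 1)]], [[(0, 0)]])

def Spec_update_cand (indices : List Int) (k : Int) (cand_row : List (List (Int × Int))) (cand_col : List (List (Int × Int))) (cands_list : List (List (Int × Int))) (out : List (Int × Int)) : Prop := out = update_cand_alt indices k cand_row cand_col cands_list
instance (indices : List Int) (k : Int) (cand_row : List (List (Int × Int))) (cand_col : List (List (Int × Int))) (cands_list : List (List (Int × Int))) (out : List (Int × Int)) : Decidable (Spec_update_cand indices k cand_row cand_col cands_list out) := by unfold Spec_update_cand; infer_instance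

-- ===== CLAIM (what is proved, stated in full; the proofs are below) =====
def Claim_equal_update_cand : Prop := ∀ (indices : List Int) (k : Int) (cand_row : List (List (Int × Int))) (cand_col : List (List (Int × Int))) (cands_list : List (List (Int × Int))), Dom_update_cand indices k cand_row cand_col cands_list → Pre_update_cand indices k cand_row cand_col cands_list → Spec_update_cand indices k cand_row cand_col cands_list (update_cand indices k cand_row cand_col cands_list)

-- ===== LEMMAS AND PROOFS =====

-- the row/column candidate sets step i of either loop looks up
def pvRC (indices : List Int) (cands_list : List (List (Int × Int))) (i : Int) : Int × Int :=
  PySem.List.pyGetD (PySem.List.pyGetD cands_list i []) (PySem.List.pyGetD indices i 0) (0, 0)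
def pvRowS (indices : List Int) (cand_row : List (List (Int × Int))) (cands_list : List (List (Int × Int))) (i : Int) : PySem.Set (Int × Int) :=
  PySem.Set.ofList (PySem.List.pyGetD cand_row (pvRC indices cands_list i).1 [])
def pvColS (indices : List Int) (cand_col : List (List (Int × Int))) (cands_list : List (List (Int × Int))) (i : Int) : PySem.Set (Int × Int) :=
  PySem.Set.ofList (PySem.List.pyGetD cand_col (pvRC indices cands_list i).2 [])

-- the strict lexicographic 'before' predicate sorted2 with keys (fst, snd) sorts by
def pvBlex (a b : Int × Int) : Bool :=
  decide (a.1 < b.1) || (!decide (b.1 < a.1) && decide (a.2 < b.2))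

theorem sorted2_eq_foldl (xs : List (Int × Int)) :
    PySem.List.sorted2 xs Prod.fst Prod.snd false =
      xs.foldl (fun acc x => PySem.List.insertBy pvBlex x acc) [] := rfl

theorem insertBy_pairwise (x : Int × Int) (l : List (Int × Int))
    (h : l.Pairwise fun a b => pvBlex b a = false) :
    (PySem.List.insertBy pvBlex x l).Pairwise fun a b => pvBlex b a = false := by
  induction l with
  | nil => simp [PySem.List.insertBy]
  | cons y ys ih =>
    rw [List.pairwise_cons] at h
    obtain ⟨hy, hys⟩ := h
    show (if pvBlex x y then x :: y :: ys else y :: PySem.List.insertBy pvBlex x ys).Pairwise _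
    by_cases hxy : pvBlex x y = true
    · rw [if_pos hxy]
      refine List.Pairwise.cons ?_ (List.Pairwise.cons hy hys)
      intro z hz
      rw [List.mem_cons] at hz
      rcases hz with rfl | hz
      · simp only [pvBlex] at hxy ⊢
        simp at hxy ⊢
        omega
      · have hzy := hy z hz
        simp only [pvBlex] at hxy hzy ⊢
        simp at hxy hzy ⊢
        omega
    · rw [if_neg hxy]
      refine List.Pairwise.cons ?_ (ih hys)
      intro z hz
      rw [PySem.List.mem_insertBy] at hz
      rcases hz with rfl | hz
      · simpa using hxy
      · exact hy z hz

theorem foldl_insertBy_pairwise (xs : List (Int × Int)) :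
    (xs.foldl (fun acc x => PySem.List.insertBy pvBlex x acc) []).Pairwise
      (fun a b => pvBlex b a = false) := by
  suffices h : ∀ (xs acc : List (Int × Int)), (acc.Pairwise fun a b => pvBlex b a = false) →
      (xs.foldl (fun acc x => PySem.List.insertBy pvBlex x acc) acc).Pairwise
        (fun a b => pvBlex b a = false) by
    exact h xs [] List.Pairwise.nil
  intro xs
  induction xs with
  | nil => intro acc h; exact h
  | cons x t ih => intro acc h; exact ih _ (insertBy_pairwise x acc h)

-- on a duplicate-free list the non-strict pairwise order is strict
theorem pairwise_strict_of_nodup (l : List (Int × Int)) (hnd : l.Nodup)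
    (h : l.Pairwise fun a b => pvBlex b a = false) :
    l.Pairwise fun a b => pvBlex a b = true := by
  have hand := List.Pairwise.and hnd h
  refine hand.imp ?_
  rintro ⟨a1, a2⟩ ⟨b1, b2⟩ ⟨hne, hle⟩
  simp only [ne_eq, Prod.mk.injEq, not_and] at hne
  simp only [pvBlex] at hle ⊢
  simp at hle ⊢
  by_cases h1 : a1 = b1
  · subst h1; have := hne rfl; omega
  · omega

theorem sorted2_eq_of_perm_of_nodup (xs ys : List (Int × Int)) (hp : xs.Perm ys)
    (hx : xs.Nodup) :
    PySem.List.sorted2 xs Prod.fst Prod.snd false =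
      PySem.List.sorted2 ys Prod.fst Prod.snd false := by
  have pxs : (PySem.List.sorted2 xs Prod.fst Prod.snd false).Perm xs :=
    PySem.List.sorted2_perm xs Prod.fst Prod.snd false
  have pys : (PySem.List.sorted2 ys Prod.fst Prod.snd false).Perm ys :=
    PySem.List.sorted2_perm ys Prod.fst Prod.snd false
  have hperm : (PySem.List.sorted2 xs Prod.fst Prod.snd false).Perm
      (PySem.List.sorted2 ys Prod.fst Prod.snd false) :=
    (pxs.trans hp).trans pys.symm
  have hxnd : (PySem.List.sorted2 xs Prod.fst Prod.snd false).Nodup := pxs.nodup_iff.mpr hx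
  have hynd : (PySem.List.sorted2 ys Prod.fst Prod.snd false).Nodup :=
    pys.nodup_iff.mpr (hp.nodup_iff.mp hx)
  have s1 : (PySem.List.sorted2 xs Prod.fst Prod.snd false).Pairwise
      (fun a b => pvBlex a b = true) := by
    refine pairwise_strict_of_nodup _ hxnd ?_
    rw [sorted2_eq_foldl]
    exact foldl_insertBy_pairwise xs
  have s2 : (PySem.List.sorted2 ys Prod.fst Prod.snd false).Pairwise
      (fun a b => pvBlex a b = true) := by
    refine pairwise_strict_of_nodup _ hynd ?_
    rw [sorted2_eq_foldl]
    exact foldl_insertBy_pairwise ys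
  refine List.Perm.eq_of_pairwise ?_ s1 s2 hperm
  rintro ⟨a1, a2⟩ ⟨b1, b2⟩ _ _ hab hba
  simp only [pvBlex] at hab hba
  simp at hab hba
  have : a1 = b1 ∧ a2 = b2 := by omega
  simp [this.1, this.2]

-- membership in A's running-intersection loop
theorem mem_foldl_inter {α : Type} [BEq α] [LawfulBEq α] (F G : Int → PySem.Set α)
    (l : List Int) (s : PySem.Set α) (x : α) :
    (x ∈ l.foldl (fun s i => PySem.Set.inter (PySem.Set.inter s (F i)) (G i)) s) ↔
      (x ∈ s ∧ ∀ i ∈ l, x ∈ F i ∧ x ∈ G i) := by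
  induction l generalizing s with
  | nil => simp
  | cons i t ih =>
    simp only [List.foldl, ih, PySem.Set.mem_inter, List.mem_cons]
    constructor
    · rintro ⟨⟨⟨hs, hf⟩, hg⟩, ht⟩
      exact ⟨hs, fun j hj => by rcases hj with rfl | hj; exact ⟨hf, hg⟩; exact ht j hj⟩
    · rintro ⟨hs, hall⟩
      exact ⟨⟨⟨hs, (hall i (Or.inl rfl)).1⟩, (hall i (Or.inl rfl)).2⟩,
        fun j hj => hall j (Or.inr hj)⟩

theorem nodup_foldl_inter {α : Type} [BEq α] (F G : Int → PySem.Set α)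
    (l : List Int) (s : PySem.Set α) (h : s.Nodup) :
    (l.foldl (fun s i => PySem.Set.inter (PySem.Set.inter s (F i)) (G i)) s).Nodup := by
  induction l generalizing s with
  | nil => exact h
  | cons i t ih => exact ih _ (PySem.Set.nodup_inter _ _ (PySem.Set.nodup_inter _ _ h))

-- B's nested tally loops are one tally loop over the concatenation of all the sets
theorem foldl_two_eq_flatMap {κ ν : Type} (step : ν → κ → ν) (F G : Int → List κ)
    (l : List Int) (d0 : ν) :
    l.foldl (fun d i => (G i).foldl step ((F i).foldl step d)) d0 =
      (l.flatMap (fun i => F i ++ G i)).foldl step d0 := by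
  induction l generalizing d0 with
  | nil => rfl
  | cons i t ih => simp [List.flatMap_cons, List.foldl_append, ih]

-- the filtered tally items are the elements of the flattened input whose count is m
theorem bfilter_eq (BF : List (Int × Int)) (m : Int) :
    (((PySem.Dict.counter BF).items.filter (fun p => p.2 == m)).map Prod.fst)
      = (PySem.Set.ofList BF).filter (fun x => ((BF.count x : Int) == m)) := by
  rw [PySem.Dict.items_counter, List.filter_map, List.map_map]
  have h1 : (Prod.fst ∘ fun k : Int × Int => (k, (List.count k BF : Int))) = id := rfl
  rw [h1, List.map_id]
  rfl

-- an element's tally over the 2·|l| duplicate-free blocks is 2·|l| iff it is in every block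
theorem count_flatMap_pairs {κ : Type} [BEq κ] [LawfulBEq κ] (F G : Int → List κ)
    (hF : ∀ i, (F i).Nodup) (hG : ∀ i, (G i).Nodup) (l : List Int) (x : κ) :
    (l.flatMap (fun i => F i ++ G i)).count x ≤ 2 * l.length ∧
      ((l.flatMap (fun i => F i ++ G i)).count x = 2 * l.length ↔
        ∀ i ∈ l, x ∈ F i ∧ x ∈ G i) := by
  induction l with
  | nil => simp
  | cons i t ih =>
    have hf1 : (F i).count x ≤ 1 := List.nodup_iff_count_le_one.mp (hF i) x
    have hg1 : (G i).count x ≤ 1 := List.nodup_iff_count_le_one.mp (hG i) x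
    have hfm : x ∈ F i ↔ 0 < (F i).count x := List.count_pos_iff.symm
    have hgm : x ∈ G i ↔ 0 < (G i).count x := List.count_pos_iff.symm
    obtain ⟨ihle, ihiff⟩ := ih
    simp only [List.flatMap_cons, List.count_append, List.length_cons, List.mem_cons]
    constructor
    · omega
    · constructor
      · intro h j hj
        rcases hj with rfl | hj
        · rw [hfm, hgm]; constructor <;> omega
        · exact ihiff.mp (by omega) j hj
      · intro h
        have h1 := h i (Or.inl rfl)
        rw [hfm, hgm] at h1
        have h2 := ihiff.mpr (fun j hj => h j (Or.inr hj))
        omega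

theorem pvWitness_ok : Dom_update_cand (pvWitness_update_cand.1) (pvWitness_update_cand.2.1) (pvWitness_update_cand.2.2.1) (pvWitness_update_cand.2.2.2.1) (pvWitness_update_cand.2.2.2.2) ∧ Pre_update_cand (pvWitness_update_cand.1) (pvWitness_update_cand.2.1) (pvWitness_update_cand.2.2.1) (pvWitness_update_cand.2.2.2.1) (pvWitness_update_cand.2.2.2.2) := by
  constructor
  · decide
  · decide

-- ===== VERDICT (by name: the statement is the Claim_ definition above) =====
theorem update_cand_spec : Claim_equal_update_cand := by
  intro indices k cand_row cand_col cands_list _ hpre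
  obtain ⟨hk, -, -, -⟩ := hpre
  unfold Spec_update_cand update_cand update_cand_alt
  by_cases hk0 : k = 0
  · simp [hk0]
  · have hk1 : 0 < k := by omega
    simp only [if_neg hk0]
    show PySem.List.sorted2
        ((PySem.List.pyRange 1 k 1).foldl (fun s i =>
            PySem.Set.inter (PySem.Set.inter s (pvRowS indices cand_row cands_list i))
              (pvColS indices cand_col cands_list i))
          (PySem.Set.inter (pvRowS indices cand_row cands_list 0)
            (pvColS indices cand_col cands_list 0)))
        Prod.fst Prod.snd false
      = PySem.List.sorted2
        ((((PySem.List.pyRange 0 k 1).foldl (fun d i =>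
            (pvColS indices cand_col cands_list i : List (Int × Int)).foldl
              (fun d x => d.modify x 0 (· + 1))
              ((pvRowS indices cand_row cands_list i : List (Int × Int)).foldl
                (fun d x => d.modify x 0 (· + 1)) d))
          PySem.Dict.empty).items.filter (fun p => p.2 == 2 * k)).map Prod.fst)
        Prod.fst Prod.snd false
    have hcounts : ((PySem.List.pyRange 0 k 1).foldl (fun d i =>
            (pvColS indices cand_col cands_list i : List (Int × Int)).foldl
              (fun d x => d.modify x 0 (· + 1))
              ((pvRowS indices cand_row cands_list i : List (Int × Int)).foldl
                (fun d x => d.modify x 0 (· + 1)) d))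
          PySem.Dict.empty)
        = PySem.Dict.counter ((PySem.List.pyRange 0 k 1).flatMap (fun i =>
            (pvRowS indices cand_row cands_list i : List (Int × Int)) ++
              pvColS indices cand_col cands_list i)) := by
      rw [PySem.Dict.counter_eq_foldl]
      exact foldl_two_eq_flatMap _ _ _ _ _
    rw [hcounts, bfilter_eq]
    have hrange0 : PySem.List.pyRange 0 k 1 = 0 :: PySem.List.pyRange 1 k 1 := by
      have := PySem.List.pyRange_one_cons (a := 0) (b := k) hk1
      simpa using this
    have hlen : (PySem.List.pyRange 0 k 1).length = k.toNat := by
      simp [PySem.List.pyRange]; omega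
    have hndA : ((PySem.List.pyRange 1 k 1).foldl (fun s i =>
        PySem.Set.inter (PySem.Set.inter s (pvRowS indices cand_row cands_list i))
          (pvColS indices cand_col cands_list i))
        (PySem.Set.inter (pvRowS indices cand_row cands_list 0)
          (pvColS indices cand_col cands_list 0))).Nodup :=
      nodup_foldl_inter _ _ _ _
        (PySem.Set.nodup_inter _ _ (PySem.Set.nodup_ofList _))
    have hndB : ((PySem.Set.ofList ((PySem.List.pyRange 0 k 1).flatMap (fun i =>
        (pvRowS indices cand_row cands_list i : List (Int × Int)) ++
          pvColS indices cand_col cands_list i))).filter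
        (fun x => ((((PySem.List.pyRange 0 k 1).flatMap (fun i =>
          (pvRowS indices cand_row cands_list i : List (Int × Int)) ++
            pvColS indices cand_col cands_list i)).count x : Int) == 2 * k))).Nodup :=
      (PySem.Set.nodup_ofList _).filter _
    refine sorted2_eq_of_perm_of_nodup _ _ ?_ hndA
    refine (List.perm_ext_iff_of_nodup hndA hndB).mpr ?_
    intro a
    have hcnt := count_flatMap_pairs
      (fun i => (pvRowS indices cand_row cands_list i : List (Int × Int)))
      (fun i => (pvColS indices cand_col cands_list i : List (Int × Int)))
      (fun i => PySem.Set.nodup_ofList _) (fun i => PySem.Set.nodup_ofList _)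
      (PySem.List.pyRange 0 k 1) a
    rw [mem_foldl_inter, PySem.Set.mem_inter, List.mem_filter, PySem.Set.mem_ofList,
      beq_iff_eq]
    constructor
    · rintro ⟨⟨h0r, h0c⟩, hrest⟩
      have hall : ∀ i ∈ PySem.List.pyRange 0 k 1,
          a ∈ (pvRowS indices cand_row cands_list i : List (Int × Int)) ∧
            a ∈ (pvColS indices cand_col cands_list i : List (Int × Int)) := by
        rw [hrange0]
        intro i hi
        rcases List.mem_cons.mp hi with rfl | hi
        · exact ⟨h0r, h0c⟩
        · exact hrest i hi
      have hc := hcnt.2.mpr hall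
      refine ⟨?_, ?_⟩
      · exact List.mem_flatMap.mpr ⟨0, by rw [hrange0]; exact List.mem_cons_self,
          List.mem_append.mpr (Or.inl h0r)⟩
      · rw [hc, hlen]; omega
    · rintro ⟨hmem', hcint⟩
      have hc : ((PySem.List.pyRange 0 k 1).flatMap (fun i =>
          (pvRowS indices cand_row cands_list i : List (Int × Int)) ++
            pvColS indices cand_col cands_list i)).count a
          = 2 * (PySem.List.pyRange 0 k 1).length := by
        rw [hlen]; omega
      have hall := hcnt.2.mp hc
      rw [hrange0] at hall
      exact ⟨⟨(hall 0 List.mem_cons_self).1, (hall 0 List.mem_cons_self).2⟩,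
        fun i hi => hall i (List.mem_cons_of_mem _ hi)⟩
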